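-- pv_equiv track=rewrite | github.com/DanyaHDanny/-PythonForDQE | 2Collections.py | create_aggregated_common_dict
-- ===== SOURCE A (Python) =====
-- def create_aggregated_common_dict(list_to_be_aggregated: list):
--     result_dict = {}
--     # creates set with unique keys from generated list
--     for k in set([j for i in list_to_be_aggregated for j in i]):
--         # counts how many times was found needed key
--         key_met_count = 0
--         # value to be in result
--         value = 0
--         # dict number for key letter_N, where N - dict_number with max value
--         dict_number = 0
--         for i in list_to_be_aggregated:
--             for j in i:
--                 # if found needed key
--                 if j == k:
--                     key_met_count += 1
--                     # if first time or value is bigger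
--                     if key_met_count == 1 or i[j] > value:
--                         value = i[j]
--                         dict_number = list_to_be_aggregated.index(i)
--         # if key found one time, then key is letter_N(where letter = key, N - dict_number), else key = letter
--         result_dict[k if key_met_count == 1 else k + '_' + str(dict_number + 1)] = value
--     return result_dict
-- ===== SOURCE B (Python) =====
-- def create_aggregated_common_dict(list_to_be_aggregated: list):
--     # Single pass: per key keep (count, max value, index of the dict holding the first maximum).
--     agg = {}
--     for idx, d in enumerate(list_to_be_aggregated):
--         for key, val in d.items():
--             entry = agg.get(key)
--             if entry is None:
--                 agg[key] = [1, val, idx]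
--             else:
--                 entry[0] += 1
--                 if val > entry[1]:
--                     entry[1] = val
--                     entry[2] = idx
--     return {(k if c == 1 else k + '_' + str(n + 1)): v for k, (c, v, n) in agg.items()}
-- ===== Notes on version B (the rewrite author's own statement) =====
-- stated objective: faster
-- what changed: A rescans the whole list of dicts once per unique key (with a linear list.index call inside the hot branch); B makes a single pass over the dicts, aggregating per key a (count, max value, index of the dict holding the first maximum) triple in one dictionary, then renders the result from that dictionary.
import Mathlib
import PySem

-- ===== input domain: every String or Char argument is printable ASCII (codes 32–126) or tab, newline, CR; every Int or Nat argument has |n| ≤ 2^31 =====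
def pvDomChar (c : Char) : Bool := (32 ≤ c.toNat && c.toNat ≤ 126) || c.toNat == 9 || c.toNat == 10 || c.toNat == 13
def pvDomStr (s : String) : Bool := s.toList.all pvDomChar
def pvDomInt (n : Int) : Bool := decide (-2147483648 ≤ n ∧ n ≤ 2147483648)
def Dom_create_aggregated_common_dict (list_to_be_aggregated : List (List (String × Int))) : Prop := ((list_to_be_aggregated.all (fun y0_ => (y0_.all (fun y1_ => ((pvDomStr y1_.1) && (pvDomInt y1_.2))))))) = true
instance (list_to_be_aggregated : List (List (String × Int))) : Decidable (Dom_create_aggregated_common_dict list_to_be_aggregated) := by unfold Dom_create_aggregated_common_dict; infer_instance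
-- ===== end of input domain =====

-- B replaces A's per-unique-key rescans of the whole list (O(U·N) with a linear list.index inside)
-- by ONE pass that aggregates count / max / index-of-first-max per key in a dict (objective: faster, asymptotic).

-- ===== PORT A =====
-- the inner double loop of A for one key k: (key_met_count, value, dict_number) after the scan
def pvAggA (list_to_be_aggregated : List (List (String × Int))) (k : String) : Int × Int × Int :=
  list_to_be_aggregated.foldl (fun st i =>
    ((PySem.Dict.mk i).keys).foldl (fun st j =>
      if j == k then
        let c := st.1 + 1
        if c == 1 || (PySem.Dict.mk i).getD j 0 > st.2.1 then
          (c, (PySem.Dict.mk i).getD j 0, (((PySem.List.index? list_to_be_aggregated i).getD 0 : Nat) : Int))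
        else (c, st.2.1, st.2.2)
      else st) st) (0, 0, 0)

def create_aggregated_common_dict (list_to_be_aggregated : List (List (String × Int))) : List (String × Int) :=
  ((PySem.Set.ofList (list_to_be_aggregated.flatMap (fun i => (PySem.Dict.mk i).keys))).foldl
    (fun rd k =>
      let r := pvAggA list_to_be_aggregated k
      PySem.Dict.insert rd (if r.1 == 1 then k else k ++ "_" ++ PySem.Int.toStr (r.2.2 + 1)) r.2.1)
    PySem.Dict.empty).items

-- ===== PORT B =====
def create_aggregated_common_dict_alt (list_to_be_aggregated : List (List (String × Int))) : List (String × Int) :=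
  let agg : PySem.Dict String (Int × Int × Int) :=
    (PySem.List.enumerate list_to_be_aggregated).foldl (fun agg ti =>
      ti.2.foldl (fun agg p =>
        match PySem.Dict.get? agg p.1 with
        | none => PySem.Dict.insert agg p.1 (1, p.2, ti.1)
        | some e => PySem.Dict.insert agg p.1 (e.1 + 1, if p.2 > e.2.1 then (p.2, ti.1) else e.2)) agg)
      PySem.Dict.empty
  (agg.items.foldl (fun rd e =>
      PySem.Dict.insert rd (if e.2.1 == 1 then e.1 else e.1 ++ "_" ++ PySem.Int.toStr (e.2.2.2 + 1)) e.2.2.1)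
    PySem.Dict.empty).items

-- ===== PRECONDITION & SPEC =====
-- Pre_ requires each inner association list to have pairwise-distinct keys: the parameter is a
-- list of Python dicts (A iterates them and subscripts i[j]), and an association list with a
-- duplicated key does not represent any Python dict, so no Python input is excluded.
def Pre_create_aggregated_common_dict (list_to_be_aggregated : List (List (String × Int))) : Prop :=
  ∀ d ∈ list_to_be_aggregated, (d.map Prod.fst).Nodup
instance (list_to_be_aggregated : List (List (String × Int))) : Decidable (Pre_create_aggregated_common_dict list_to_be_aggregated) := by unfold Pre_create_aggregated_common_dict; infer_instance

def pvWitness_create_aggregated_common_dict : (List (List (String × Int))) :=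
  [[("a", 2), ("b", 3)], [("a", 5)]]

def Spec_create_aggregated_common_dict (list_to_be_aggregated : List (List (String × Int))) (out : List (String × Int)) : Prop := out = create_aggregated_common_dict_alt list_to_be_aggregated
instance (list_to_be_aggregated : List (List (String × Int))) (out : List (String × Int)) : Decidable (Spec_create_aggregated_common_dict list_to_be_aggregated out) := by unfold Spec_create_aggregated_common_dict; infer_instance

-- ===== CLAIM (what is proved, stated in full; the proofs are below) =====
def Claim_equal_create_aggregated_common_dict : Prop := ∀ (list_to_be_aggregated : List (List (String × Int))), Dom_create_aggregated_common_dict list_to_be_aggregated → Pre_create_aggregated_common_dict list_to_be_aggregated → Spec_create_aggregated_common_dict list_to_be_aggregated (create_aggregated_common_dict list_to_be_aggregated)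

-- ===== LEMMAS AND PROOFS =====

-- the common per-occurrence step of A (once the dict index is known positionally)
def pvStep (st : Int × Int × Int) (v t : Int) : Int × Int × Int :=
  let c := st.1 + 1
  if c == 1 || v > st.2.1 then (c, v, t) else (c, st.2.1, st.2.2)

-- the per-occurrence step of B on the optional aggregate entry
def pvOStep (o : Option (Int × Int × Int)) (v t : Int) : Int × Int × Int :=
  match o with
  | none => (1, v, t)
  | some e => (e.1 + 1, if v > e.2.1 then (v, t) else e.2)

-- the flattened stream of (dict position, key, value) triples
def pvTr (L : List (List (String × Int))) : List (Int × String × Int) :=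
  (PySem.List.enumerate L).flatMap (fun ti => ti.2.map (fun p => (ti.1, p.1, p.2)))

def pvOFold (tr : List (Int × String × Int)) (k : String) : Option (Int × Int × Int) :=
  tr.foldl (fun o e => if e.2.1 == k then some (pvOStep o e.2.2 e.1) else o) none

-- the common reference aggregate of both programs for key k
def pvG (L : List (List (String × Int))) (k : String) : Int × Int × Int :=
  (pvOFold (pvTr L) k).getD (0, 0, 0)

-- ---- generic list plumbing ----

theorem pv_flatMap_foldl {α β σ : Type} (xs : List α) (g : α → List β) (S : σ → β → σ) (init : σ) :
    (xs.flatMap g).foldl S init = xs.foldl (fun st x => (g x).foldl S st) init := by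
  induction xs generalizing init with
  | nil => rfl
  | cons x xs ih => simp [List.flatMap_cons, List.foldl_append, ih]

theorem pv_foldl_enumerate_snd {α σ : Type} (L : List α) (f : σ → α → σ) (init : σ) (s : Int) :
    (PySem.List.enumerate L s).foldl (fun st ti => f st ti.2) init = L.foldl f init := by
  have h := PySem.List.map_snd_enumerate L s
  calc (PySem.List.enumerate L s).foldl (fun st ti => f st ti.2) init
      = ((PySem.List.enumerate L s).map (fun x => x.2)).foldl f init := (List.foldl_map).symm
    _ = L.foldl f init := by rw [h]

theorem pv_index?_append_not_mem {α : Type} [BEq α] [LawfulBEq α] (pre l : List α) (x : α)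
    (h : x ∉ pre) :
    PySem.List.index? (pre ++ l) x = (PySem.List.index? l x).map (· + pre.length) := by
  induction pre with
  | nil => simp [Option.map_id']
  | cons a pre ih =>
    have hax : a ≠ x := by intro he; exact h (he ▸ List.mem_cons_self)
    have hx : x ∉ pre := fun hm => h (List.mem_cons_of_mem _ hm)
    rw [List.cons_append, PySem.List.index?_cons_of_ne _ hax, ih hx]
    cases PySem.List.index? l x
    · simp
    · simp; omega

-- ---- inner-dict reduction: a key-filtered fold over one dict fires at most once ----

theorem pv_inner_skip {σ : Type} (i : List (String × Int)) (u : σ → Int → σ) (st : σ) (k : String)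
    (h : k ∉ i.map Prod.fst) :
    i.foldl (fun st p => if p.1 == k then u st p.2 else st) st = st := by
  induction i generalizing st with
  | nil => rfl
  | cons p i ih =>
    simp only [List.map_cons, List.mem_cons, not_or] at h
    rw [List.foldl_cons, if_neg (fun hc => h.1 ((by simpa using hc : p.1 = k)).symm), ih _ h.2]

theorem pv_inner_reduce {σ : Type} (i : List (String × Int)) (u : σ → Int → σ) (st : σ) (k : String)
    (hnd : (i.map Prod.fst).Nodup) :
    i.foldl (fun st p => if p.1 == k then u st p.2 else st) st
      = match (PySem.Dict.mk i).get? k with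
        | none => st
        | some v => u st v := by
  induction i generalizing st with
  | nil => rfl
  | cons p i ih =>
    simp only [List.map_cons, List.nodup_cons] at hnd
    rw [List.foldl_cons, PySem.Dict.get?_mk_cons]
    by_cases hpk : p.1 = k
    · rw [if_pos (by simpa using hpk), if_pos (by simpa using hpk)]
      exact pv_inner_skip i u (u st p.2) k (hpk ▸ hnd.1)
    · rw [if_neg (by simpa using hpk), if_neg (by simpa using hpk)]
      exact ih _ hnd.2

-- ---- A's per-key scan, step 1: replace i[j] by the pair's value, flatten index form ----

theorem pv_aggA_eq_dictfold (L : List (List (String × Int))) (k : String)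
    (hpre : Pre_create_aggregated_common_dict L) :
    pvAggA L k
      = L.foldl (fun st i =>
          match (PySem.Dict.mk i).get? k with
          | none => st
          | some v => pvStep st v (((PySem.List.index? L i).getD 0 : Nat) : Int)) (0, 0, 0) := by
  unfold pvAggA
  apply PySem.List.foldl_congr_mem
  intro st i hi
  have hnd : (i.map Prod.fst).Nodup := hpre i hi
  rw [PySem.Dict.keys_mk, List.foldl_map]
  have h1 : i.foldl (fun st p =>
        if p.1 == k then
          let c := st.1 + 1
          if c == 1 || (PySem.Dict.mk i).getD p.1 0 > st.2.1 then
            (c, (PySem.Dict.mk i).getD p.1 0, (((PySem.List.index? L i).getD 0 : Nat) : Int))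
          else (c, st.2.1, st.2.2)
        else st) st
      = i.foldl (fun st p =>
          if p.1 == k then pvStep st p.2 (((PySem.List.index? L i).getD 0 : Nat) : Int) else st) st := by
    apply PySem.List.foldl_congr_mem
    intro st p hp
    have hg : (PySem.Dict.mk i).getD p.1 0 = p.2 :=
      PySem.Dict.getD_of_mem_items (PySem.Dict.mk i) (by simpa using hp)
        (by rw [PySem.Dict.keys_mk]; exact hnd) 0
    simp only [hg, pvStep]
  rw [h1]
  exact pv_inner_reduce i (fun st v => pvStep st v (((PySem.List.index? L i).getD 0 : Nat) : Int)) st k hnd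

-- ---- A's per-key scan, step 2: list.index(i) is the position of the dict being scanned ----

theorem pv_index_to_pos (L : List (List (String × Int))) (k : String) :
    ∀ (suf pre : List (List (String × Int))) (st : Int × Int × Int),
      L = pre ++ suf →
      st.1 = (pre.countP (fun d => ((PySem.Dict.mk d).get? k).isSome) : Int) →
      (∀ d ∈ pre, ∀ v, (PySem.Dict.mk d).get? k = some v → v ≤ st.2.1) →
      (PySem.List.enumerate suf (pre.length : Int)).foldl (fun st ti =>
          match (PySem.Dict.mk ti.2).get? k with
          | none => st
          | some v => pvStep st v (((PySem.List.index? L ti.2).getD 0 : Nat) : Int)) st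
        = (PySem.List.enumerate suf (pre.length : Int)).foldl (fun st ti =>
            match (PySem.Dict.mk ti.2).get? k with
            | none => st
            | some v => pvStep st v ti.1) st := by
  intro suf
  induction suf with
  | nil => intro pre st _ _ _; rfl
  | cons i suf ih =>
    intro pre st hL hc hb
    have hlen : ((pre ++ [i]).length : Int) = (pre.length : Int) + 1 := by
      simp [List.length_append]
    have hL' : L = (pre ++ [i]) ++ suf := by rw [hL]; simp
    rw [PySem.List.enumerate_cons, List.foldl_cons, List.foldl_cons]
    cases hgi : (PySem.Dict.mk i).get? k with
    | none =>
      simp only [hgi]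
      have hc' : st.1 = (((pre ++ [i]).countP (fun d => ((PySem.Dict.mk d).get? k).isSome)) : Int) := by
        rw [List.countP_append]; simp [List.countP_cons, hgi, hc]
      have hb' : ∀ d ∈ pre ++ [i], ∀ v, (PySem.Dict.mk d).get? k = some v → v ≤ st.2.1 := by
        intro d hd v hv
        rcases List.mem_append.mp hd with hd | hd
        · exact hb d hd v hv
        · simp only [List.mem_singleton] at hd; subst hd; rw [hgi] at hv; cases hv
      have h := ih (pre ++ [i]) st hL' hc' hb'
      rw [hlen] at h
      exact h
    | some v =>
      simp only [hgi]
      have hcnt1 : ∀ d ∈ pre, ∀ v', (PySem.Dict.mk d).get? k = some v' → (1 : Int) ≤ st.1 := by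
        intro d hd v' hv'
        have h1 : 0 < pre.countP (fun d => ((PySem.Dict.mk d).get? k).isSome) := by
          rw [List.countP_pos_iff]
          exact ⟨d, hd, by simp [hv']⟩
        rw [hc]; exact_mod_cast h1
      by_cases hcond : (st.1 + 1 == 1 || decide (v > st.2.1)) = true
      · -- the update fires: no earlier dict can equal i, so list.index(i) is its position
        have hnotmem : i ∉ pre := by
          intro hmem
          have h2 : v ≤ st.2.1 := hb i hmem v hgi
          have h3 : (1 : Int) ≤ st.1 := hcnt1 i hmem v hgi
          simp only [Bool.or_eq_true, beq_iff_eq, decide_eq_true_eq] at hcond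
          rcases hcond with h | h
          · omega
          · omega
        have hidx : PySem.List.index? L i = some pre.length := by
          rw [hL, pv_index?_append_not_mem pre (i :: suf) i hnotmem,
            PySem.List.index?_cons_self]
          simp
        have e1 : pvStep st v (((PySem.List.index? L i).getD 0 : Nat) : Int)
            = (st.1 + 1, v, (pre.length : Int)) := by
          simp only [pvStep, hidx, Option.getD_some]
          rw [if_pos hcond]
        have e2 : pvStep st v ((pre.length : Int)) = (st.1 + 1, v, (pre.length : Int)) := by
          simp only [pvStep]
          rw [if_pos hcond]
        rw [e1, e2]
        have hc' : ((st.1 + 1, v, (pre.length : Int)) : Int × Int × Int).1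
            = (((pre ++ [i]).countP (fun d => ((PySem.Dict.mk d).get? k).isSome)) : Int) := by
          rw [List.countP_append]
          simp only [List.countP_cons, List.countP_nil, hgi, Option.isSome_some]
          push_cast
          omega
        have hb' : ∀ d ∈ pre ++ [i], ∀ v',
            (PySem.Dict.mk d).get? k = some v' → v' ≤ ((st.1 + 1, v, (pre.length : Int)) : Int × Int × Int).2.1 := by
          intro d hd v' hv'
          rcases List.mem_append.mp hd with hd | hd
          · simp only [Bool.or_eq_true, beq_iff_eq, decide_eq_true_eq] at hcond
            rcases hcond with h | h
            · exact absurd (hcnt1 d hd v' hv') (by omega)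
            · have := hb d hd v' hv'
              simp only
              omega
          · simp only [List.mem_singleton] at hd; subst hd
            rw [hgi] at hv'
            have hv2 : v = v' := Option.some.inj hv'
            simp only
            omega
        have h := ih (pre ++ [i]) (st.1 + 1, v, (pre.length : Int)) hL' hc' hb'
        rw [hlen] at h
        exact h
      · have e1 : pvStep st v (((PySem.List.index? L i).getD 0 : Nat) : Int)
            = (st.1 + 1, st.2.1, st.2.2) := by
          simp only [pvStep]
          rw [if_neg hcond]
        have e2 : pvStep st v ((pre.length : Int)) = (st.1 + 1, st.2.1, st.2.2) := by
          simp only [pvStep]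
          rw [if_neg hcond]
        rw [e1, e2]
        have hc' : ((st.1 + 1, st.2.1, st.2.2) : Int × Int × Int).1
            = (((pre ++ [i]).countP (fun d => ((PySem.Dict.mk d).get? k).isSome)) : Int) := by
          rw [List.countP_append]
          simp only [List.countP_cons, List.countP_nil, hgi, Option.isSome_some]
          push_cast
          omega
        have hb' : ∀ d ∈ pre ++ [i], ∀ v',
            (PySem.Dict.mk d).get? k = some v' → v' ≤ ((st.1 + 1, st.2.1, st.2.2) : Int × Int × Int).2.1 := by
          intro d hd v' hv'
          rcases List.mem_append.mp hd with hd | hd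
          · exact hb d hd v' hv'
          · simp only [List.mem_singleton] at hd; subst hd
            rw [hgi] at hv'
            have hv2 : v' = v := (Option.some.inj hv').symm
            subst hv2
            simp only [Bool.or_eq_true, beq_iff_eq, decide_eq_true_eq, not_or] at hcond
            simp only
            omega
        have h := ih (pre ++ [i]) (st.1 + 1, st.2.1, st.2.2) hL' hc' hb'
        rw [hlen] at h
        exact h

-- ---- positional dict-level fold = fold over the flattened triple stream ----

theorem pv_posfold_eq_trfold (L : List (List (String × Int))) (k : String)
    (hpre : Pre_create_aggregated_common_dict L) (st : Int × Int × Int) :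
    (PySem.List.enumerate L).foldl (fun st ti =>
        match (PySem.Dict.mk ti.2).get? k with
        | none => st
        | some v => pvStep st v ti.1) st
      = (pvTr L).foldl (fun st e => if e.2.1 == k then pvStep st e.2.2 e.1 else st) st := by
  unfold pvTr
  rw [pv_flatMap_foldl]
  apply PySem.List.foldl_congr_mem
  intro st ti hti
  rw [List.foldl_map]
  have hnd : (ti.2.map Prod.fst).Nodup := by
    rcases (PySem.List.mem_enumerate_iff L 0 ti).mp hti with ⟨j, hj, hp⟩
    subst hp
    exact hpre _ (List.getElem_mem hj)
  exact (pv_inner_reduce ti.2 (fun st v => pvStep st v ti.1) st k hnd).symm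

-- ---- A's plain fold equals the option-state fold ----

theorem pv_trfold_eq_ofold (tr : List (Int × String × Int)) (k : String) :
    ∀ (o : Option (Int × Int × Int)), (∀ e, o = some e → 1 ≤ e.1) →
      tr.foldl (fun st e => if e.2.1 == k then pvStep st e.2.2 e.1 else st) (o.getD (0, 0, 0))
        = (tr.foldl (fun o e => if e.2.1 == k then some (pvOStep o e.2.2 e.1) else o) o).getD (0, 0, 0) := by
  induction tr with
  | nil => intro o _; rfl
  | cons e tr ih =>
    intro o ho
    rw [List.foldl_cons, List.foldl_cons]
    by_cases hk : (e.2.1 == k) = true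
    · rw [if_pos hk, if_pos hk]
      have hstep : pvStep (o.getD (0, 0, 0)) e.2.2 e.1 = pvOStep o e.2.2 e.1 := by
        cases o with
        | none => simp [pvStep, pvOStep]
        | some x =>
          have h1 : (1 : Int) ≤ x.1 := ho x rfl
          have hbe : (x.1 + 1 == 1) = false := by simp; omega
          simp only [pvStep, pvOStep, Option.getD_some, hbe, Bool.false_or]
          by_cases hv : e.2.2 > x.2.1
          · rw [if_pos (by simpa using hv), if_pos hv]
          · rw [if_neg (by simpa using hv), if_neg hv]
      rw [hstep]
      have ho' : ∀ e', some (pvOStep o e.2.2 e.1) = some e' → (1 : Int) ≤ e'.1 := by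
        intro e' he'
        have he2 : pvOStep o e.2.2 e.1 = e' := Option.some.inj he'
        subst he2
        cases o with
        | none => simp [pvOStep]
        | some x => have := ho x rfl; simp only [pvOStep]; omega
      have h := ih (some (pvOStep o e.2.2 e.1)) ho'
      simpa using h
    · rw [if_neg hk, if_neg hk]
      exact ih o ho

theorem pv_aggA_eq_pvG (L : List (List (String × Int))) (k : String)
    (hpre : Pre_create_aggregated_common_dict L) :
    pvAggA L k = pvG L k := by
  rw [pv_aggA_eq_dictfold L k hpre]
  rw [← pv_foldl_enumerate_snd L _ ((0 : Int), (0 : Int), (0 : Int)) 0]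
  have h0 := pv_index_to_pos L k L [] (0, 0, 0) rfl (by simp) (by simp)
  simp only [List.length_nil, Nat.cast_zero] at h0
  rw [h0, pv_posfold_eq_trfold L k hpre]
  unfold pvG pvOFold
  exact pv_trfold_eq_ofold (pvTr L) k none (by intro e he; cases he)

-- ---- B's aggregation dict characterised ----

theorem pv_ofold_isSome (tr : List (Int × String × Int)) (k : String) :
    ∀ (o : Option (Int × Int × Int)),
      ((tr.foldl (fun o e => if e.2.1 == k then some (pvOStep o e.2.2 e.1) else o) o).isSome)
        = (o.isSome || decide (k ∈ tr.map (fun e => e.2.1))) := by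
  induction tr with
  | nil => intro o; simp
  | cons e tr ih =>
    intro o
    rw [List.foldl_cons]
    by_cases hk : (e.2.1 == k) = true
    · rw [if_pos hk, ih]
      have : k = e.2.1 := (beq_iff_eq.mp hk).symm
      subst this
      simp
    · rw [if_neg hk, ih]
      have hne : k ≠ e.2.1 := fun h => hk (by simp [h])
      congr 1
      exact (decide_eq_decide).mpr (by simp [List.mem_cons, hne])

theorem pv_get?_map_mk (K : List String) (g : String → Int × Int × Int) (x : String)
    (hnd : K.Nodup) :
    (PySem.Dict.mk (K.map (fun k => (k, g k)))).get? x
      = if x ∈ K then some (g x) else none := by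
  induction K with
  | nil => simp; rfl
  | cons a K ih =>
    simp only [List.nodup_cons] at hnd
    rw [List.map_cons, PySem.Dict.get?_mk_cons]
    by_cases hax : a = x
    · subst hax
      rw [if_pos (by simp), if_pos (List.mem_cons_self)]
    · rw [if_neg (by simpa using hax), ih hnd.2]
      by_cases hxK : x ∈ K
      · rw [if_pos hxK, if_pos (List.mem_cons_of_mem _ hxK)]
      · rw [if_neg hxK, if_neg (by simp [Ne.symm hax, hxK])]

theorem pv_insert_map_mk_mem (K : List String) (g : String → Int × Int × Int) (x : String)
    (v : Int × Int × Int) (hx : x ∈ K) :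
    (PySem.Dict.mk (K.map (fun k => (k, g k)))).insert x v
      = PySem.Dict.mk (K.map (fun k => (k, if k = x then v else g k))) := by
  have hcont : (PySem.Dict.mk (K.map (fun k => (k, g k)))).contains x = true := by
    rw [PySem.Dict.contains_mk]
    simp only [List.any_map, List.any_eq_true]
    exact ⟨x, hx, by simp⟩
  apply PySem.Dict.ext
  rw [PySem.Dict.items_insert_of_contains _ _ hcont]
  show (K.map (fun k => (k, g k))).map _ = _
  rw [List.map_map]
  apply List.map_congr_left
  intro k _
  by_cases hk : k = x
  · subst hk; simp
  · simp [hk]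

theorem pv_insert_map_mk_not_mem (K : List String) (g : String → Int × Int × Int) (x : String)
    (v : Int × Int × Int) (hx : x ∉ K) :
    (PySem.Dict.mk (K.map (fun k => (k, g k)))).insert x v
      = PySem.Dict.mk ((K ++ [x]).map (fun k => (k, if k = x then v else g k))) := by
  have hcont : (PySem.Dict.mk (K.map (fun k => (k, g k)))).contains x = false := by
    rw [PySem.Dict.contains_mk]
    simp only [List.any_map, List.any_eq_false]
    intro k hk
    simp only [Function.comp_apply, beq_eq_false_iff_ne]
    intro he
    exact hx ((eq_of_beq he) ▸ hk)
  apply PySem.Dict.ext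
  rw [PySem.Dict.items_insert_of_not_contains _ _ hcont]
  show (K.map (fun k => (k, g k))) ++ [(x, v)] = _
  rw [List.map_append]
  congr 1
  · apply List.map_congr_left
    intro k hk
    have : k ≠ x := fun he => hx (he ▸ hk)
    simp [this]
  · simp

theorem pv_b_agg (tr : List (Int × String × Int)) :
    tr.foldl (fun agg e =>
        match PySem.Dict.get? agg e.2.1 with
        | none => PySem.Dict.insert agg e.2.1 ((1 : Int), e.2.2, e.1)
        | some x => PySem.Dict.insert agg e.2.1 (x.1 + 1, if e.2.2 > x.2.1 then (e.2.2, e.1) else x.2))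
      PySem.Dict.empty
      = PySem.Dict.mk ((PySem.Set.ofList (tr.map (fun e => e.2.1))).map
          (fun k => (k, (pvOFold tr k).getD (0, 0, 0)))) := by
  induction tr using List.reverseRecOn with
  | nil => rfl
  | append_singleton tr e ih =>
    rw [List.foldl_append, List.foldl_cons, List.foldl_nil, ih]
    have hK : PySem.Set.ofList ((tr ++ [e]).map (fun e => e.2.1))
        = PySem.Set.add (PySem.Set.ofList (tr.map (fun e => e.2.1))) e.2.1 := by
      rw [List.map_append, PySem.Set.ofList_eq_foldl, List.foldl_append,
        ← PySem.Set.ofList_eq_foldl]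
      rfl
    have hOF : ∀ k, pvOFold (tr ++ [e]) k
        = if e.2.1 == k then some (pvOStep (pvOFold tr k) e.2.2 e.1) else pvOFold tr k := by
      intro k; unfold pvOFold; rw [List.foldl_append]; rfl
    have hnd : (PySem.Set.ofList (tr.map (fun e => e.2.1)) : List String).Nodup :=
      PySem.Set.nodup_ofList _
    by_cases hmem : e.2.1 ∈ (PySem.Set.ofList (tr.map (fun e => e.2.1)) : List String)
    · have hs : (pvOFold tr e.2.1).isSome = true := by
        unfold pvOFold
        rw [pv_ofold_isSome]
        simp [(PySem.Set.mem_ofList _ _).mp hmem]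
      have hsome : pvOFold tr e.2.1 = some ((pvOFold tr e.2.1).getD (0, 0, 0)) := by
        cases ho : pvOFold tr e.2.1
        · rw [ho] at hs; cases hs
        · rfl
      rw [pv_get?_map_mk _ _ e.2.1 hnd, if_pos hmem]
      show PySem.Dict.insert _ e.2.1 _ = _
      rw [pv_insert_map_mk_mem _ _ e.2.1 _ hmem]
      have hadd : PySem.Set.add (PySem.Set.ofList (tr.map (fun e => e.2.1))) e.2.1
          = PySem.Set.ofList (tr.map (fun e => e.2.1)) := by
        simp [PySem.Set.add, PySem.Set.contains, hmem]
      rw [hK, hadd]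
      congr 1
      apply List.map_congr_left
      intro k hkK
      rw [hOF k]
      by_cases hke : k = e.2.1
      · subst hke
        rw [if_pos rfl, if_pos (beq_self_eq_true e.2.1), Option.getD_some, hsome]
        rfl
      · rw [if_neg hke, if_neg (by simpa using Ne.symm hke)]
    · have hs : (pvOFold tr e.2.1).isSome = false := by
        unfold pvOFold
        rw [pv_ofold_isSome]
        simpa using fun hmm => hmem ((PySem.Set.mem_ofList _ _).mpr hmm)
      have hnone : pvOFold tr e.2.1 = none := by
        cases ho : pvOFold tr e.2.1
        · rfl
        · rw [ho] at hs; cases hs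
      rw [pv_get?_map_mk _ _ e.2.1 hnd, if_neg hmem]
      show PySem.Dict.insert _ e.2.1 _ = _
      rw [pv_insert_map_mk_not_mem _ _ e.2.1 _ hmem]
      have hadd : PySem.Set.add (PySem.Set.ofList (tr.map (fun e => e.2.1))) e.2.1
          = (PySem.Set.ofList (tr.map (fun e => e.2.1)) : List String) ++ [e.2.1] := by
        simp [PySem.Set.add, PySem.Set.contains, hmem]
      rw [hK, hadd]
      congr 1
      apply List.map_congr_left
      intro k hkK
      rw [hOF k]
      by_cases hke : k = e.2.1
      · subst hke
        rw [if_pos rfl, if_pos (beq_self_eq_true e.2.1), Option.getD_some, hnone]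
        rfl
      · rw [if_neg hke, if_neg (by simpa using Ne.symm hke)]

theorem pv_tr_keys (L : List (List (String × Int))) :
    (pvTr L).map (fun e => e.2.1) = L.flatMap (fun i => i.map Prod.fst) := by
  unfold pvTr
  rw [List.map_flatMap]
  have h1 : ∀ ti : Int × List (String × Int),
      ((ti.2.map (fun p => (ti.1, p.1, p.2))).map (fun e => e.2.1)) = ti.2.map Prod.fst := by
    intro ti; rw [List.map_map]; rfl
  simp only [h1]
  rw [← PySem.List.map_snd_enumerate L 0, List.flatMap_map]
  simp [PySem.List.map_snd_enumerate]

-- ===== VERDICT (by name: the statement is the Claim_ definition above) =====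
theorem create_aggregated_common_dict_spec : Claim_equal_create_aggregated_common_dict := by
  intro L _ hpre
  show create_aggregated_common_dict L = create_aggregated_common_dict_alt L
  unfold create_aggregated_common_dict create_aggregated_common_dict_alt
  have hflat : (PySem.List.enumerate L).foldl (fun agg ti =>
        ti.2.foldl (fun agg p =>
          match PySem.Dict.get? agg p.1 with
          | none => PySem.Dict.insert agg p.1 ((1 : Int), p.2, ti.1)
          | some e => PySem.Dict.insert agg p.1 (e.1 + 1, if p.2 > e.2.1 then (p.2, ti.1) else e.2)) agg)
      PySem.Dict.empty
      = (pvTr L).foldl (fun agg e =>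
          match PySem.Dict.get? agg e.2.1 with
          | none => PySem.Dict.insert agg e.2.1 ((1 : Int), e.2.2, e.1)
          | some x => PySem.Dict.insert agg e.2.1 (x.1 + 1, if e.2.2 > x.2.1 then (e.2.2, e.1) else x.2))
        PySem.Dict.empty := by
    unfold pvTr
    rw [pv_flatMap_foldl]
    apply PySem.List.foldl_congr_mem
    intro agg ti _
    rw [List.foldl_map]
  rw [hflat, pv_b_agg]
  have hkeys : (L.flatMap (fun i => (PySem.Dict.mk i).keys)) = (pvTr L).map (fun e => e.2.1) := by
    rw [pv_tr_keys]
    simp only [PySem.Dict.keys_mk]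
  show _ = (((PySem.Set.ofList ((pvTr L).map (fun e => e.2.1))).map
      (fun k => (k, (pvOFold (pvTr L) k).getD (0, 0, 0)))).foldl (fun rd e =>
        PySem.Dict.insert rd
          (if e.2.1 == 1 then e.1 else e.1 ++ "_" ++ PySem.Int.toStr (e.2.2.2 + 1)) e.2.2.1)
      PySem.Dict.empty).items
  rw [List.foldl_map, hkeys]
  congr 1
  apply PySem.List.foldl_congr_mem
  intro rd k _
  rw [show pvAggA L k = pvG L k from pv_aggA_eq_pvG L k hpre]
  rfl
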